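-- pv_equiv track=rewrite | github.com/ExplosiveBattery/XYW | SCUNET/parallel import/logout.py | changeIPFormat
-- ===== SOURCE A (Python) =====
-- def changeIPFormat(ip):
-- 	result = ""
-- 	for c in ip:
-- 		if c=='.':
-- 			result += "2e"
-- 		else:
-- 			result += "3"+c
-- 	return result+"5f"
-- ===== SOURCE B (Python) =====
-- def changeIPFormat(ip):
--     segments = ip.split('.')
--     return '2e'.join(''.join('3' + c for c in segment) for segment in segments) + '5f'
-- ===== Notes on version B (the rewrite author's own statement) =====
-- stated objective: alternative
-- what changed: Replaces the per-character branch on '.' inside one accumulating loop by a two-level decomposition: split the string on '.', prefix every character of each segment with '3', then join the segments with '2e' and append '5f'.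
import Mathlib
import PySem

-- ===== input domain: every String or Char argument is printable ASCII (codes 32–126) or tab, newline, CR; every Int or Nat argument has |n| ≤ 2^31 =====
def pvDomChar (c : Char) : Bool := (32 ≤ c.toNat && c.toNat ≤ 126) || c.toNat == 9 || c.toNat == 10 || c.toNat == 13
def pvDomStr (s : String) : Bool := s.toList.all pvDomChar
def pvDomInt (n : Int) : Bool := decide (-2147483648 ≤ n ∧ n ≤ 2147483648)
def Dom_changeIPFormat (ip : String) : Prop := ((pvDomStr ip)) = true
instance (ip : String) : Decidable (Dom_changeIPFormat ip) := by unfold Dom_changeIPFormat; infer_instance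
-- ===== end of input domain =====

-- B replaces A's single char-loop with a dot-branch by split-on-'.', per-segment '3'-prefixing, and a '2e' join (alternative decomposition).


-- ===== PORT A =====
-- literal port of A's loop: accumulate over the characters, '.' → "2e", else "3"+c, then append "5f"
def changeIPFormat (ip : String) : String :=
  String.mk
    ((ip.toList.foldl (fun r c => if c = '.' then r ++ ['2', 'e'] else r ++ ['3', c]) []) ++ ['5', 'f'])

-- ===== PORT B =====
-- port of Source B: split on '.', prefix each char of a segment with '3', join with "2e", append "5f"
def changeIPFormat_alt (ip : String) : String :=
  let segments := ip.toList.splitOn '.'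
  let enc := segments.map (fun seg => seg.flatMap (fun c => ['3', c]))
  String.mk (PySem.Chars.join ['2', 'e'] enc ++ ['5', 'f'])

-- ===== PRECONDITION & SPEC =====
def Spec_changeIPFormat (ip : String) (out : String) : Prop := out = changeIPFormat_alt ip
instance (ip : String) (out : String) : Decidable (Spec_changeIPFormat ip out) := by unfold Spec_changeIPFormat; infer_instance

-- ===== CLAIM (what is proved, stated in full; the proofs are below) =====
def Claim_equal_changeIPFormat : Prop := ∀ (ip : String), Dom_changeIPFormat ip → Spec_changeIPFormat ip (changeIPFormat ip)

-- ===== LEMMAS AND PROOFS =====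

def pvEnc (c : Char) : List Char := if c = '.' then ['2', 'e'] else ['3', c]

lemma pvFoldl_enc (cs : List Char) (acc : List Char) :
    cs.foldl (fun r c => if c = '.' then r ++ ['2', 'e'] else r ++ ['3', c]) acc
      = acc ++ cs.flatMap pvEnc := by
  induction cs generalizing acc with
  | nil => simp
  | cons c cs ih =>
    simp only [List.foldl_cons, List.flatMap_cons, ih, pvEnc]
    split <;> simp

lemma pvJoin_head (sep a x : List Char) (l : List (List Char)) :
    PySem.Chars.join sep ((a ++ x) :: l) = a ++ PySem.Chars.join sep (x :: l) := by
  cases l with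
  | nil => simp [PySem.Chars.join_singleton]
  | cons b l => simp [PySem.Chars.join_cons_cons, List.append_assoc]

lemma pvSplit_join (cs : List Char) :
    PySem.Chars.join ['2', 'e']
      ((cs.splitOnP (· == '.')).map (fun seg => seg.flatMap (fun c => ['3', c])))
      = cs.flatMap pvEnc := by
  induction cs with
  | nil => simp [List.splitOnP_nil, PySem.Chars.join_singleton]
  | cons c cs ih =>
    rw [List.splitOnP_cons]
    by_cases h : c = '.'
    · simp only [h, beq_self_eq_true, if_pos]
      obtain ⟨a, l, hal⟩ : ∃ a l, cs.splitOnP (· == '.') = a :: l := by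
        cases hsp : cs.splitOnP (· == '.') with
        | nil => exact absurd hsp (List.splitOnP_ne_nil _ _)
        | cons a l => exact ⟨a, l, rfl⟩
      rw [hal] at ih ⊢
      simp only [List.map_cons] at ih
      simp only [List.map_cons, List.flatMap_nil, PySem.Chars.join_cons_cons, List.nil_append,
        List.flatMap_cons, pvEnc, ih, if_true]
    · simp only [beq_iff_eq, if_neg h]
      obtain ⟨a, l, hal⟩ : ∃ a l, cs.splitOnP (· == '.') = a :: l := by
        cases hsp : cs.splitOnP (· == '.') with
        | nil => exact absurd hsp (List.splitOnP_ne_nil _ _)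
        | cons a l => exact ⟨a, l, rfl⟩
      rw [hal] at ih ⊢
      simp only [List.map_cons] at ih
      simp only [List.modifyHead_cons, List.map_cons, List.flatMap_cons, pvEnc, if_neg h]
      rw [pvJoin_head, ih]

-- ===== VERDICT (by name: the statement is the Claim_ definition above) =====
theorem changeIPFormat_spec : Claim_equal_changeIPFormat := by
  intro ip _
  unfold Spec_changeIPFormat changeIPFormat changeIPFormat_alt
  rw [pvFoldl_enc, List.nil_append]
  dsimp only
  rw [List.splitOn, pvSplit_join]
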